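-- pv_equiv track=rewrite | github.com/skpradhan1/python_practice | CodingPattern/slidingwindow/string_anagram_index.py | find_string_anagrams
-- ===== SOURCE A (Python) =====
-- from collections import Counter
--
-- def find_string_anagrams(str, pattern):
--     result_index = []
--     k = len(pattern)
--     for i in range(len(str)-k+1):
--         str1 = str[i:i+k]
--         if Counter(str1) == Counter(pattern):
--             result_index.append(i)
--     return result_index
-- ===== SOURCE B (Python) =====
-- def find_string_anagrams(str, pattern):
--     k = len(pattern)
--     n = len(str)
--     if k > n:
--         return []
--     need = {}
--     for ch in pattern:
--         need[ch] = need.get(ch, 0) + 1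
--     window = {}
--     for ch in str[:k]:
--         window[ch] = window.get(ch, 0) + 1
--     result = [0] if window == need else []
--     for i, (c, d) in enumerate(zip(str[k:], str), start=1):
--         window[c] = window.get(c, 0) + 1
--         window[d] = window[d] - 1
--         if window[d] == 0:
--             del window[d]
--         if window == need:
--             result.append(i)
--     return result
-- ===== Notes on version B (the rewrite author's own statement) =====
-- stated objective: alternative
-- what changed: A rebuilds a Counter of every length-k window and compares it to a freshly built Counter of the pattern; B builds the pattern count dict once and slides a single window count dict across the string, incrementing the incoming and decrementing the outgoing character (fewer character touches per position, though A's C-implemented Counter is not beaten on the clock).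
import Mathlib
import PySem

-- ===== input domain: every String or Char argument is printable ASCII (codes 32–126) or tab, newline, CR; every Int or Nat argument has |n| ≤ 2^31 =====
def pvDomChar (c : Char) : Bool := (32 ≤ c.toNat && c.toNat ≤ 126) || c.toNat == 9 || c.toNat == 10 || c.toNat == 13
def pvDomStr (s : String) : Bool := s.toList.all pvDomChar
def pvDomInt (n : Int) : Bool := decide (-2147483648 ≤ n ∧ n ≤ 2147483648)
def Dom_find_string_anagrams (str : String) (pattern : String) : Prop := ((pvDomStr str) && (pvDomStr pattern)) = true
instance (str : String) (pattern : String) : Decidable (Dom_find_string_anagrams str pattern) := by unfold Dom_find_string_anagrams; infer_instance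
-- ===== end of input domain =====

-- B replaces A's per-window Counter rebuild with a single sliding count dict updated
-- incrementally (one increment, one decrement and one dict comparison per position);
-- the return values are proved equal.

-- Python's `==` on dicts (and on Counters holding no zero counts, as all freshly built Counters do):
-- equal key sets and equal values, insertion order ignored.
def pyDictEq (d1 d2 : PySem.Dict Char Int) : Bool :=
  PySem.Set.equal (PySem.Dict.keys d1) (PySem.Dict.keys d2) &&
    (PySem.Dict.keys d1).all (fun c => PySem.Dict.get? d1 c == PySem.Dict.get? d2 c)

-- ===== PORT A =====
def find_string_anagrams (str : String) (pattern : String) : List Int :=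
  let k : Int := PySem.Str.len pattern
  (PySem.List.pyRange 0 (PySem.Str.len str - k + 1)).foldl
    (fun result_index i =>
      let str1 := PySem.List.slice str.toList (some i) (some (i + k))
      if pyDictEq (PySem.Dict.counter str1) (PySem.Dict.counter pattern.toList)
      then result_index ++ [i] else result_index) []

-- ===== PORT B =====
-- one step of B's sliding window: add incoming char c, remove outgoing char d
-- (`window[d] = window[d] - 1` is ported with getD 0: d is always a key of the window there,
--  so the default is never used and the port is exact).
def bStepCore (w : PySem.Dict Char Int) (c d : Char) : PySem.Dict Char Int :=
  let w1 := w.modify c 0 (· + 1)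
  let w2 := w1.modify d 0 (· - 1)
  if w2.getD d 0 == 0 then w2.erase d else w2

def bStep (need : PySem.Dict Char Int)
    (st : (Int × PySem.Dict Char Int) × List Int) (cd : Char × Char) :
    (Int × PySem.Dict Char Int) × List Int :=
  let w3 := bStepCore st.1.2 cd.1 cd.2
  ((st.1.1 + 1, w3), if pyDictEq w3 need then st.2 ++ [st.1.1] else st.2)

def find_string_anagrams_alt (str : String) (pattern : String) : List Int :=
  let s := str.toList
  let p := pattern.toList
  let k := p.length
  let n := s.length
  if k > n then [] else
    let need := p.foldl (fun d ch => d.modify ch 0 (· + 1)) PySem.Dict.empty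
    let window := (PySem.List.slice s none (some (k : Int))).foldl
      (fun d ch => d.modify ch 0 (· + 1)) PySem.Dict.empty
    let result : List Int := if pyDictEq window need then [0] else []
    (((PySem.List.slice s (some (k : Int)) none).zip s).foldl (bStep need)
      ((1, window), result)).2

-- ===== PRECONDITION & SPEC =====
def Spec_find_string_anagrams (str : String) (pattern : String) (out : List Int) : Prop := out = find_string_anagrams_alt str pattern
instance (str : String) (pattern : String) (out : List Int) : Decidable (Spec_find_string_anagrams str pattern out) := by unfold Spec_find_string_anagrams; infer_instance

-- ===== CLAIM (what is proved, stated in full; the proofs are below) =====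
def Claim_equal_find_string_anagrams : Prop := ∀ (str : String) (pattern : String), Dom_find_string_anagrams str pattern → Spec_find_string_anagrams str pattern (find_string_anagrams str pattern)

-- ===== LEMMAS AND PROOFS =====

-- invariant of B's loop: the window dict holds exactly the positive character counts of the slice l
def CInv (w : PySem.Dict Char Int) (l : List Char) : Prop :=
  ∀ c : Char, w.get? c = if 0 < l.count c then some ((l.count c : Int)) else none

theorem pv_get?_erase (d : PySem.Dict Char Int) (k j : Char) :
    (d.erase k).get? j = if j = k then none else d.get? j := by
  obtain ⟨items⟩ := d
  induction items with
  | nil => simp [PySem.Dict.erase, PySem.Dict.get?]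
  | cons hd tl ih =>
    simp only [PySem.Dict.erase, PySem.Dict.get?, List.filter_cons] at *
    by_cases h1 : hd.1 = k <;> by_cases h2 : hd.1 = j <;> simp_all

theorem pv_inv_getD (w : PySem.Dict Char Int) (l : List Char) (h : CInv w l) (c : Char) :
    w.getD c 0 = (l.count c : Int) := by
  simp only [PySem.Dict.getD, h c]
  split_ifs with hp
  · simp
  · simp; omega

theorem pv_get?_modify (w : PySem.Dict Char Int) (k j : Char) (f : Int → Int) :
    (w.modify k 0 f).get? j = if j = k then some (f (w.getD k 0)) else w.get? j := by
  simp [PySem.Dict.modify, PySem.Dict.get?_insert]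

theorem pv_step_inv (w : PySem.Dict Char Int) (t : List Char) (c d : Char)
    (h : CInv w (d :: t)) : CInv (bStepCore w c d) (t ++ [c]) := by
  intro e
  have hD := pv_inv_getD w (d :: t) h
  simp only [bStepCore]
  have hw1 : ∀ j, (w.modify c 0 (· + 1)).get? j =
      if j = c then some (((d :: t).count c : Int) + 1) else w.get? j := by
    intro j; rw [pv_get?_modify, hD]
  have hw1D : (w.modify c 0 (· + 1)).getD d 0 =
      ((d :: t).count d : Int) + (if d = c then 1 else 0) := by
    simp only [PySem.Dict.getD, hw1]
    split_ifs with hdc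
    · subst hdc; simp
    · rw [h d]; split_ifs with hp
      · simp
      · exact absurd (by simp : 0 < (d :: t).count d) hp
  have h1 : ∀ j, ((w.modify c 0 (· + 1)).modify d 0 (· - 1)).get? j =
      if j = d then some (((d :: t).count d : Int) + (if d = c then 1 else 0) - 1)
      else if j = c then some (((d :: t).count c : Int) + 1) else w.get? j := by
    intro j; rw [pv_get?_modify, PySem.Dict.getD, ← PySem.Dict.getD, hw1D]
    by_cases hj : j = d <;> simp [hj, hw1]
  have hgD : ((w.modify c 0 (· + 1)).modify d 0 (· - 1)).getD d 0 =
      ((d :: t).count d : Int) + (if d = c then 1 else 0) - 1 := by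
    simp [PySem.Dict.getD, h1]
  have hh := h e
  clear hD hw1 hw1D h
  rw [hgD]
  by_cases hed : e = d <;> by_cases hec : e = c <;> by_cases hdc : d = c <;>
    split_ifs with hz <;>
    simp_all [pv_get?_erase, List.count_append, List.count_eq_zero,
      eq_comm (a := c) (b := d), eq_comm (a := c) (b := e), eq_comm (a := d) (b := e)] <;>
    (try omega)

theorem pv_step_inv_nil (w : PySem.Dict Char Int) (c : Char)
    (h : CInv w []) : CInv (bStepCore w c c) [] := by
  intro e
  have hD := pv_inv_getD w [] h
  simp only [bStepCore]
  have h2 : ∀ j, ((w.modify c 0 (· + 1)).modify c 0 (· - 1)).get? j =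
      if j = c then some 0 else w.get? j := by
    intro j
    rw [pv_get?_modify]
    by_cases hj : j = c <;>
      simp [hj, PySem.Dict.getD, pv_get?_modify, h c]
  have hgD : ((w.modify c 0 (· + 1)).modify c 0 (· - 1)).getD c 0 = 0 := by
    simp [PySem.Dict.getD, h2]
  rw [hgD]
  rw [if_pos (by simp), pv_get?_erase]
  by_cases he : e = c <;> simp [he, h2, h e]

theorem pv_counter_get? (l : List Char) (c : Char) :
    (PySem.Dict.counter l).get? c = if 0 < l.count c then some ((l.count c : Int)) else none := by
  by_cases h : 0 < l.count c
  · have hmem : c ∈ (PySem.Dict.counter l).keys := by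
      rw [PySem.Dict.keys_counter, PySem.Set.mem_ofList]; exact List.count_pos_iff.mp h
    have hD := PySem.Dict.getD_counter l c
    rcases hv : (PySem.Dict.counter l).get? c with _ | v
    · exact absurd ((PySem.Dict.get?_eq_none_iff_not_mem_keys _ _).mp hv) (by simpa using hmem)
    · simp only [PySem.Dict.getD, hv, Option.getD_some] at hD
      simp [h, hD]
  · have hnm : c ∉ (PySem.Dict.counter l).keys := by
      rw [PySem.Dict.keys_counter, PySem.Set.mem_ofList]
      exact fun hc => h (List.count_pos_iff.mpr hc)
    simp [h, (PySem.Dict.get?_eq_none_iff_not_mem_keys _ _).mpr hnm]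

theorem pv_pyDictEq_congr (w w' need : PySem.Dict Char Int)
    (h : ∀ c, w.get? c = w'.get? c) : pyDictEq w need = pyDictEq w' need := by
  have hmem : ∀ c, c ∈ w.keys ↔ c ∈ w'.keys := by
    intro c
    rw [← not_iff_not, ← PySem.Dict.get?_eq_none_iff_not_mem_keys,
        ← PySem.Dict.get?_eq_none_iff_not_mem_keys, h]
  rw [Bool.eq_iff_iff]
  simp only [pyDictEq, Bool.and_eq_true, PySem.Set.equal_iff, List.all_eq_true]
  constructor
  · rintro ⟨h1, h2⟩
    refine ⟨fun x => (hmem x).symm.trans (h1 x), fun x hx => ?_⟩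
    rw [← h]; exact h2 x ((hmem x).mpr hx)
  · rintro ⟨h1, h2⟩
    refine ⟨fun x => (hmem x).trans (h1 x), fun x hx => ?_⟩
    rw [h]; exact h2 x ((hmem x).mp hx)

theorem pv_loop (s p : List Char) (j : Nat) (w : PySem.Dict Char Int) (res : List Int)
    (hinv : CInv w ((s.drop j).take p.length)) (hjk : p.length + j ≤ s.length) :
    (((s.drop (p.length + j)).zip (s.drop j)).foldl (bStep (PySem.Dict.counter p))
        (((j : Int) + 1, w), res)).2
      = res ++ (PySem.List.pyRange ((j : Int) + 1) ((s.length - p.length + 1 : Nat) : Int)).filter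
          (fun i => pyDictEq
            (PySem.Dict.counter (PySem.List.slice s (some i) (some (i + (p.length : Int)))))
            (PySem.Dict.counter p)) := by
  generalize hm : s.length - (p.length + j) = m
  induction m generalizing j w res with
  | zero =>
    have hlen : p.length + j = s.length := by omega
    rw [hlen, List.drop_length]
    simp only [List.zip_nil_left, List.foldl_nil]
    rw [PySem.List.pyRange_one_eq_nil (by omega), List.filter_nil, List.append_nil]
  | succ m ih =>
    have hlt : p.length + j < s.length := by omega
    have hj : j < s.length := by omega
    rw [List.drop_eq_getElem_cons hlt, List.drop_eq_getElem_cons hj, List.zip_cons_cons,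
        List.foldl_cons]
    have hnew : CInv (bStepCore w s[p.length + j] s[j]) ((s.drop (j + 1)).take p.length) := by
      rcases Nat.eq_zero_or_pos p.length with hk | hk
      · simp only [hk, List.take_zero, Nat.zero_add] at hinv ⊢
        exact pv_step_inv_nil w s[j] hinv
      · obtain ⟨k', hk'⟩ : ∃ k', p.length = k' + 1 := ⟨p.length - 1, by omega⟩
        have hold : (s.drop j).take p.length
            = s[j] :: ((s.drop (j + 1)).take k') := by
          rw [List.drop_eq_getElem_cons hj, hk', List.take_succ_cons]
        have hnext : (s.drop (j + 1)).take p.length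
            = ((s.drop (j + 1)).take k') ++ [s[p.length + j]] := by
          conv_lhs => rw [hk', List.take_add_one, List.getElem?_drop,
              show j + 1 + k' = p.length + j from by omega,
              List.getElem?_eq_getElem hlt]
          rfl
        rw [hold] at hinv
        rw [hnext]
        exact pv_step_inv w _ _ _ hinv
    have hPeq : pyDictEq (bStepCore w s[p.length + j] s[j]) (PySem.Dict.counter p)
        = pyDictEq (PySem.Dict.counter (PySem.List.slice s (some ((j : Int) + 1))
            (some ((j : Int) + 1 + (p.length : Int))))) (PySem.Dict.counter p) := by
      have hsl : PySem.List.slice s (some ((j : Int) + 1))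
          (some ((j : Int) + 1 + (p.length : Int))) = (s.drop (j + 1)).take p.length := by
        rw [show ((j : Int) + 1) = ((j + 1 : Nat) : Int) from by push_cast; ring,
            show ((j + 1 : Nat) : Int) + (p.length : Int) = ((j + 1 + p.length : Nat) : Int) from by
              push_cast; ring,
            PySem.List.slice_natCast]
        congr 1
        omega
      rw [hsl]
      exact pv_pyDictEq_congr _ _ _
        (fun e => (hnew e).trans (pv_counter_get? ((s.drop (j + 1)).take p.length) e).symm)
    simp only [bStep]
    have hih := ih (j + 1) (bStepCore w s[p.length + j] s[j])
      (if pyDictEq (bStepCore w s[p.length + j] s[j]) (PySem.Dict.counter p)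
        then res ++ [(j : Int) + 1] else res)
      hnew (by omega) (by omega)
    rw [show p.length + (j + 1) = p.length + j + 1 from by omega] at hih
    rw [show (((j + 1 : Nat) : Int) + 1) = ((j : Int) + 1 + 1) from by push_cast; ring] at hih
    rw [hih]
    rw [PySem.List.pyRange_one_cons (show ((j : Int) + 1) < ((s.length - p.length + 1 : Nat) : Int)
          from by omega),
        List.filter_cons]
    simp only [hPeq]
    split_ifs <;> simp

theorem pv_counter_inv (l : List Char) : CInv (PySem.Dict.counter l) l :=
  fun c => pv_counter_get? l c

-- ===== VERDICT (by name: the statement is the Claim_ definition above) =====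
theorem find_string_anagrams_spec : Claim_equal_find_string_anagrams := by
  intro str pattern _
  unfold Spec_find_string_anagrams find_string_anagrams find_string_anagrams_alt
  rw [PySem.List.foldl_append_if_eq_filter (p := fun i => pyDictEq
      (PySem.Dict.counter (PySem.List.slice str.toList (some i)
        (some (i + PySem.Str.len pattern)))) (PySem.Dict.counter pattern.toList))]
  simp only [PySem.Str.len_eq, List.nil_append]
  by_cases hkn : pattern.toList.length > str.toList.length
  · rw [if_pos hkn, PySem.List.pyRange_one_eq_nil (by omega), List.filter_nil]
  · rw [if_neg hkn]
    rw [show ((str.toList.length : Int) - (pattern.toList.length : Int) + 1)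
        = ((str.toList.length - pattern.toList.length + 1 : Nat) : Int) from by omega]
    rw [← PySem.Dict.counter_eq_foldl]
    simp only [PySem.List.slice_to _ (Int.natCast_nonneg _),
      PySem.List.slice_from _ (Int.natCast_nonneg _), Int.toNat_natCast,
      ← PySem.Dict.counter_eq_foldl]
    have hloop := pv_loop str.toList pattern.toList 0
      (PySem.Dict.counter (str.toList.take pattern.toList.length))
      (if pyDictEq (PySem.Dict.counter (str.toList.take pattern.toList.length))
          (PySem.Dict.counter pattern.toList) then [0] else [])
      (by simpa using pv_counter_inv (str.toList.take pattern.toList.length)) (by omega)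
    simp only [Nat.add_zero, List.drop_zero, Nat.cast_zero, zero_add] at hloop
    rw [hloop]
    rw [PySem.List.pyRange_one_cons (show (0 : Int) < _ from by omega), List.filter_cons]
    have hsl : PySem.List.slice str.toList (some 0) (some (0 + (pattern.toList.length : Int)))
        = str.toList.take pattern.toList.length := by
      rw [show (0 : Int) = ((0 : Nat) : Int) from rfl,
          show (((0 : Nat) : Int) + (pattern.toList.length : Int))
            = ((pattern.toList.length : Nat) : Int) from by push_cast; ring,
          PySem.List.slice_natCast]
      simp
    rw [hsl]
    split_ifs <;> simp
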